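-- pv_equiv track=rewrite | github.com/ShantihBlah/Test_metre_of_classical_Chinese_poetry | gelv_poem_TEST/get_data.py | section2all
-- ===== SOURCE A (Python) =====
-- def section2all(wds):
--     n = 0
--     transition = []
--     yunbu = []
--     all = []
--     while n < len(wds):
--         if n % 2 == 1:
--             transition.append(wds[n])
--         else:
--             yunbu.append(wds[n])
--         n += 1
--     yunbu_yun = dict(zip(yunbu,transition)) #将各大韵部和对应的字装成字典dict
--     ensemble = ''
--     for section in transition:
--         ensemble += section
--     for word in ensemble:
--         all.append(word)
--     return all, yunbu_yun
-- ===== SOURCE B (Python) =====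
-- def section2all(wds):
--     yunbu_yun = {}
--     all = []
--     rest = wds
--     while len(rest) >= 2:
--         k, v = rest[0], rest[1]
--         rest = rest[2:]
--         yunbu_yun[k] = v
--         all.extend(v)
--     return all, yunbu_yun
-- ===== Notes on version B (the rewrite author's own statement) =====
-- stated objective: simpler
-- what changed: Replaces the index-parity partition into two lists followed by dict(zip), a string-concatenation pass and a char-append pass with a single loop that consumes the list two elements at a time, inserting each (key,value) pair into the dict and extending the output with the value's characters in the same step.
import Mathlib
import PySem

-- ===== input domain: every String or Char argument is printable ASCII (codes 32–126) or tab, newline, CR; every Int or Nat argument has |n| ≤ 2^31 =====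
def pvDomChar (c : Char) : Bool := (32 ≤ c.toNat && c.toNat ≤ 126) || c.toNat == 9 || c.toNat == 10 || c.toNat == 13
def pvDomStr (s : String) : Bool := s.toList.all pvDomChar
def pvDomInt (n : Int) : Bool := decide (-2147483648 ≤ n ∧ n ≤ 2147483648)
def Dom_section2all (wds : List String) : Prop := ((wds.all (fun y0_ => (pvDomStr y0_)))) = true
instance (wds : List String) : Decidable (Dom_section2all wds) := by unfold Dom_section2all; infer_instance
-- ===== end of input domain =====

-- B replaces A's parity-partition + dict(zip) + two flattening passes by one loop over
-- consecutive pairs (simpler decomposition; same asymptotic cost).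

-- ===== PORT A =====
-- the 'while n < len(wds)' loop: state (transition, yunbu), index n
def section2allLoop (wds : List String) (n : Nat) (st : List String × List String) :
    List String × List String :=
  if _h : n < wds.length then
    section2allLoop wds (n + 1)
      (if n % 2 == 1 then (st.1 ++ [wds.getD n ""], st.2)
       else (st.1, st.2 ++ [wds.getD n ""]))
  else st
termination_by wds.length - n

def section2all (wds : List String) : List String × (List (String × String)) :=
  let st := section2allLoop wds 0 ([], [])
  let transition := st.1
  let yunbu := st.2
  let yunbu_yun : PySem.Dict String String := PySem.Dict.ofList (yunbu.zip transition)
  let ensemble : List Char := transition.foldl (fun acc s => acc ++ s.toList) []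
  let all : List String := ensemble.foldl (fun acc c => acc ++ [String.ofList [c]]) []
  (all, yunbu_yun.items)

-- ===== PORT B =====
-- the 'while len(rest) >= 2' loop of Source B: takes k, v off the front, inserts, extends
def section2allAltGo (rest : List String) (all : List String)
    (d : PySem.Dict String String) : List String × PySem.Dict String String :=
  match rest with
  | k :: v :: r => section2allAltGo r (all ++ v.toList.map (fun c => String.ofList [c])) (d.insert k v)
  | _ => (all, d)

def section2all_alt (wds : List String) : List String × (List (String × String)) :=
  let r := section2allAltGo wds [] PySem.Dict.empty
  (r.1, r.2.items)

-- ===== PRECONDITION & SPEC =====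
def Spec_section2all (wds : List String) (out : List String × (List (String × String))) : Prop := out = section2all_alt wds
instance (wds : List String) (out : List String × (List (String × String))) : Decidable (Spec_section2all wds out) := by unfold Spec_section2all; infer_instance

-- ===== CLAIM (what is proved, stated in full; the proofs are below) =====
def Claim_equal_section2all : Prop := ∀ (wds : List String), Dom_section2all wds → Spec_section2all wds (section2all wds)

-- ===== LEMMAS AND PROOFS =====

-- elements at even / odd positions
mutual
def pvEvens {α : Type} : List α → List α
  | [] => []
  | x :: l => x :: pvOdds l
def pvOdds {α : Type} : List α → List α
  | [] => []
  | _ :: l => pvEvens l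
end

-- consecutive pairs (truncating a trailing unpaired element)
def pvPairs {α : Type} : List α → List (α × α)
  | k :: v :: r => (k, v) :: pvPairs r
  | _ => []

theorem pvTwoStep {α : Type} {motive : List α → Prop}
    (h0 : motive []) (h1 : ∀ x, motive [x])
    (h2 : ∀ x y l, motive l → motive (x :: y :: l)) : ∀ l, motive l
  | [] => h0
  | [x] => h1 x
  | x :: y :: l => h2 x y l (pvTwoStep h0 h1 h2 l)

theorem zip_evens_odds {α : Type} (l : List α) :
    (pvEvens l).zip (pvOdds l) = pvPairs l := by
  induction l using pvTwoStep with
  | h0 => rfl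
  | h1 x => rfl
  | h2 x y l ih => simp [pvEvens, pvOdds, pvPairs, ih]

theorem odds_eq_map_snd_pairs {α : Type} (l : List α) :
    pvOdds l = (pvPairs l).map Prod.snd := by
  induction l using pvTwoStep with
  | h0 => rfl
  | h1 x => rfl
  | h2 x y l ih => simp [pvEvens, pvOdds, pvPairs, ih]

-- A's while loop, characterised: from index n it appends the suffix's elements by parity
theorem pvEvens_nil {α : Type} : pvEvens ([] : List α) = [] := rfl
theorem pvOdds_nil {α : Type} : pvOdds ([] : List α) = [] := rfl
theorem pvEvens_cons {α : Type} (x : α) (l : List α) : pvEvens (x :: l) = x :: pvOdds l := rfl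
theorem pvOdds_cons {α : Type} (x : α) (l : List α) : pvOdds (x :: l) = pvEvens l := rfl

-- A's while loop, characterised: from index n it appends the suffix's elements by parity
theorem section2allLoop_spec (wds : List String) :
    ∀ n (t y : List String), n ≤ wds.length →
      section2allLoop wds n (t, y) =
        if n % 2 == 1 then (t ++ pvEvens (wds.drop n), y ++ pvOdds (wds.drop n))
        else (t ++ pvOdds (wds.drop n), y ++ pvEvens (wds.drop n)) := by
  intro n
  induction hk : wds.length - n using Nat.strong_induction_on generalizing n with
  | _ k ih =>
    intro t y hn
    rcases Nat.lt_or_ge n wds.length with h | h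
    · have hdrop : wds.drop n = wds[n] :: wds.drop (n + 1) :=
        List.drop_eq_getElem_cons h
      have hget : wds.getD n "" = wds[n] := List.getD_eq_getElem wds "" h
      rw [section2allLoop, dif_pos h]
      have hrec := ih (wds.length - (n + 1)) (by omega) (n + 1) rfl
      rcases Nat.even_or_odd n with he | ho
      · have hp := Nat.even_iff.mp he
        have h1 : (n % 2 == 1) = false := by simp only [beq_eq_false_iff_ne]; omega
        have h2 : ((n + 1) % 2 == 1) = true := by simp only [beq_iff_eq]; omega
        rw [h1]
        simp only [Bool.false_eq_true, if_false]
        rw [hrec t (y ++ [wds.getD n ""]) (by omega), h2]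
        simp only [if_true, hdrop, hget, pvEvens_cons, pvOdds_cons, List.append_assoc,
          List.singleton_append]
      · have hp := Nat.odd_iff.mp ho
        have h1 : (n % 2 == 1) = true := by simp only [beq_iff_eq]; omega
        have h2 : ((n + 1) % 2 == 1) = false := by simp only [beq_eq_false_iff_ne]; omega
        rw [h1]
        simp only [if_true]
        rw [hrec (t ++ [wds.getD n ""]) y (by omega), h2]
        simp only [Bool.false_eq_true, if_false, hdrop, hget, pvEvens_cons, pvOdds_cons,
          List.append_assoc, List.singleton_append]
    · have hn' : n = wds.length := by omega
      rw [section2allLoop, dif_neg (by omega)]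
      simp [hn', List.drop_length, pvEvens_nil, pvOdds_nil]

-- B's loop, characterised
theorem section2allAltGo_spec :
    ∀ (l all : List String) (d : PySem.Dict String String),
      section2allAltGo l all d =
        (all ++ (pvPairs l).flatMap (fun p => p.2.toList.map (fun c => String.ofList [c])),
         (pvPairs l).foldl (fun d p => d.insert p.1 p.2) d) := by
  intro l
  induction l using pvTwoStep with
  | h0 => intro all d; simp [section2allAltGo, pvPairs]
  | h1 x => intro all d; simp [section2allAltGo, pvPairs]
  | h2 k v r ih =>
    intro all d
    rw [section2allAltGo, ih]
    simp [pvPairs]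

theorem map_single_foldl_append :
    ∀ (ts : List String) (acc : List Char),
      (ts.foldl (fun a s => a ++ s.toList) acc).map (fun c => String.ofList [c]) =
        acc.map (fun c => String.ofList [c]) ++
          ts.flatMap (fun s => s.toList.map (fun c => String.ofList [c])) := by
  intro ts
  induction ts with
  | nil => intro acc; simp
  | cons s ts ih => intro acc; simp [List.foldl_cons, List.flatMap_def, Function.comp_def]

-- ===== VERDICT (by name: the statement is the Claim_ definition above) =====
theorem section2all_spec : Claim_equal_section2all := by
  unfold Claim_equal_section2all
  intro wds _
  unfold Spec_section2all section2all section2all_alt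
  have hA := section2allLoop_spec wds 0 [] [] (by omega)
  simp only [Nat.zero_mod, show ((0 : Nat) % 2 == 1) = false from rfl,
    Bool.false_eq_true, if_false, List.nil_append, List.drop_zero] at hA
  rw [hA, section2allAltGo_spec]
  simp only [List.nil_append]
  refine Prod.ext ?_ ?_
  · show (((pvOdds wds).foldl (fun acc s => acc ++ s.toList) []).foldl
        (fun acc c => acc ++ [String.ofList [c]]) []) = _
    rw [PySem.List.foldl_append_singleton_eq_map]
    simp only [List.nil_append]
    rw [map_single_foldl_append, odds_eq_map_snd_pairs, List.flatMap_map]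
    simp
  · show (PySem.Dict.ofList ((pvEvens wds).zip (pvOdds wds))).items = _
    rw [zip_evens_odds]
    rfl
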